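-- pv_equiv track=rewrite | github.com/YuvalGerzii/one_colsilidated_app | labor_transofrmation/Labor-market-disruption-inequality/backend/app/models/reskilling_advisor.py | _prioritize_skills
-- ===== SOURCE A (Python) =====
-- from typing import Dict, List, Tuple
--
-- def _prioritize_skills(
--
--     missing_skills: List[Dict],
--     upgrade_skills: List[Dict]
-- ) -> List[Dict]:
--     """Prioritize skills by importance and requirement"""
--     all_skills = []
--
--     # Required missing skills - highest priority
--     for skill in missing_skills:
--         if skill['required']:
--             all_skills.append({
--                 **skill,
--                 'priority': 1,
--                 'priority_score': skill['importance'] * 10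
--             })
--
--     # Skills to upgrade - medium priority
--     for skill in upgrade_skills:
--         all_skills.append({
--             **skill,
--             'priority': 2,
--             'priority_score': skill.get('gap', 1) * 5
--         })
--
--     # Optional missing skills - lower priority
--     for skill in missing_skills:
--         if not skill['required']:
--             all_skills.append({
--                 **skill,
--                 'priority': 3,
--                 'priority_score': skill['importance'] * 3
--             })
--
--     # Sort by priority then priority_score
--     all_skills.sort(key=lambda x: (x['priority'], -x['priority_score']))
--
--     return all_skills
-- ===== SOURCE B (Python) =====
-- def _prioritize_skills(missing_skills, upgrade_skills):
--     """Bucket records under their (priority, -score) sort key in a dict, then emit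
--     buckets in sorted-key order -- no sort over the records themselves."""
--     buckets = {}
--
--     def add(skill, priority, score):
--         rec = dict(skill)
--         rec['priority'] = priority
--         rec['priority_score'] = score
--         key = (priority, -score)
--         buckets[key] = buckets.get(key, []) + [rec]
--
--     for s in missing_skills:
--         if s['required']:
--             add(s, 1, s['importance'] * 10)
--     for s in upgrade_skills:
--         add(s, 2, s.get('gap', 1) * 5)
--     for s in missing_skills:
--         if not s['required']:
--             add(s, 3, s['importance'] * 3)
--
--     out = []
--     for key in sorted(buckets):
--         out.extend(buckets[key])
--     return out
-- ===== Notes on version B (the rewrite author's own statement) =====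
-- stated objective: alternative
-- what changed: Instead of tagging all records into one list and running a single global comparison sort by (priority, -priority_score), B groups the tagged records into a dict of buckets keyed by (priority, -score) as it builds them, sorts only the distinct keys, and emits the buckets in key order (insertion order inside a bucket reproduces the stable sort's tie order).
import Mathlib
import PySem

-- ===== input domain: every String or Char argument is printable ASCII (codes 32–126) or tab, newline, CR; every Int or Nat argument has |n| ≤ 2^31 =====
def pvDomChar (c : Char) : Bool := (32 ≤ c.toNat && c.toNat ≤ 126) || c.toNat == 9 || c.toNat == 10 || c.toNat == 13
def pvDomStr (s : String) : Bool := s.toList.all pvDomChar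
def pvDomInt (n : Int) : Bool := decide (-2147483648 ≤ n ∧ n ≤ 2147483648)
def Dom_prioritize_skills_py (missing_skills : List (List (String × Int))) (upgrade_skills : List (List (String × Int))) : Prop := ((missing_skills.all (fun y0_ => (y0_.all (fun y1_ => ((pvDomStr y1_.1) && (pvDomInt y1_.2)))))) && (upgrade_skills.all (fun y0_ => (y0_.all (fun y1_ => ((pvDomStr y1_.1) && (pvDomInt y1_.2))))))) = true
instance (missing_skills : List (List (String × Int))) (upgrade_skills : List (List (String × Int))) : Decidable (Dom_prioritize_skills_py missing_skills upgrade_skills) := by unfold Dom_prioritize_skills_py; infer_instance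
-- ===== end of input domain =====

-- B replaces A's global comparison sort of the tagged records with a dict of buckets
-- keyed by (priority, -priority_score): only the distinct keys are sorted and the
-- buckets (insertion order = stable tie order) are emitted in key order (objective: alternative).

-- ===== PORT A =====
-- {**skill, 'priority': p, 'priority_score': s} = two overwriting dict inserts
def pvTagA (skill : PySem.Dict String Int) (p s : Int) : PySem.Dict String Int :=
  (skill.insert "priority" p).insert "priority_score" s

def prioritize_skills_py (missing_skills : List (List (String × Int))) (upgrade_skills : List (List (String × Int))) : List (List (String × Int)) :=
  -- required missing skills (skill['required'] truthy; skill['importance'] — Pre_ guarantees the keys)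
  let all1 : List (PySem.Dict String Int) :=
    missing_skills.foldl (fun acc skill =>
      let d := PySem.Dict.mk skill
      if (d.getD "required" 0 != 0) then acc ++ [pvTagA d 1 (d.getD "importance" 0 * 10)] else acc) []
  -- skills to upgrade (skill.get('gap', 1))
  let all2 : List (PySem.Dict String Int) :=
    upgrade_skills.foldl (fun acc skill =>
      let d := PySem.Dict.mk skill
      acc ++ [pvTagA d 2 (d.getD "gap" 1 * 5)]) all1
  -- optional missing skills
  let all3 : List (PySem.Dict String Int) :=
    missing_skills.foldl (fun acc skill =>
      let d := PySem.Dict.mk skill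
      if (!(d.getD "required" 0 != 0)) then acc ++ [pvTagA d 3 (d.getD "importance" 0 * 3)] else acc) all2
  -- sort by key (x['priority'], -x['priority_score'])
  (PySem.List.sorted2 all3 (fun x => x.getD "priority" 0) (fun x => -(x.getD "priority_score" 0))).map (·.items)

-- ===== PORT B =====
-- add(skill, priority, score): rec = dict(skill); rec['priority']=p; rec['priority_score']=s;
-- buckets[(p, -s)] = buckets.get((p, -s), []) + [rec]
def pvAddB (buckets : PySem.Dict (Int × Int) (List (PySem.Dict String Int))) (skill : List (String × Int)) (p s : Int) :
    PySem.Dict (Int × Int) (List (PySem.Dict String Int)) :=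
  let r := ((PySem.Dict.mk skill).insert "priority" p).insert "priority_score" s
  let key : Int × Int := (p, -s)
  buckets.insert key (buckets.getD key [] ++ [r])

def prioritize_skills_py_alt (missing_skills : List (List (String × Int))) (upgrade_skills : List (List (String × Int))) : List (List (String × Int)) :=
  let b1 := missing_skills.foldl (fun b s =>
    if ((PySem.Dict.mk s).getD "required" 0 != 0)
    then pvAddB b s 1 ((PySem.Dict.mk s).getD "importance" 0 * 10) else b) PySem.Dict.empty
  let b2 := upgrade_skills.foldl (fun b s => pvAddB b s 2 ((PySem.Dict.mk s).getD "gap" 1 * 5)) b1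
  let b3 := missing_skills.foldl (fun b s =>
    if (!((PySem.Dict.mk s).getD "required" 0 != 0))
    then pvAddB b s 3 ((PySem.Dict.mk s).getD "importance" 0 * 3) else b) b2
  -- for key in sorted(buckets): out.extend(buckets[key])
  ((PySem.List.sorted2 b3.keys (fun c => c.1) (fun c => c.2)).foldl
    (fun out c => out ++ b3.getD c []) []).map (·.items)

-- ===== PRECONDITION & SPEC =====
-- Pre_ excludes inputs where the Python A raises KeyError: a missing-skill dict without a
-- 'required' or 'importance' key (both are read unconditionally for every missing skill).
def Pre_prioritize_skills_py (missing_skills : List (List (String × Int))) (upgrade_skills : List (List (String × Int))) : Prop :=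
  ∀ s ∈ missing_skills, (PySem.Dict.mk s).contains "required" = true ∧ (PySem.Dict.mk s).contains "importance" = true
instance (missing_skills : List (List (String × Int))) (upgrade_skills : List (List (String × Int))) : Decidable (Pre_prioritize_skills_py missing_skills upgrade_skills) := by unfold Pre_prioritize_skills_py; infer_instance
def pvWitness_prioritize_skills_py : (List (List (String × Int))) × (List (List (String × Int))) :=
  ([[("required", 1), ("importance", 2)], [("required", 0), ("importance", 5)]], [[("gap", 3)], []])

def Spec_prioritize_skills_py (missing_skills : List (List (String × Int))) (upgrade_skills : List (List (String × Int))) (out : List (List (String × Int))) : Prop := out = prioritize_skills_py_alt missing_skills upgrade_skills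
instance (missing_skills : List (List (String × Int))) (upgrade_skills : List (List (String × Int))) (out : List (List (String × Int))) : Decidable (Spec_prioritize_skills_py missing_skills upgrade_skills out) := by unfold Spec_prioritize_skills_py; infer_instance

-- ===== CLAIM (what is proved, stated in full; the proofs are below) =====
def Claim_equal_prioritize_skills_py : Prop := ∀ (missing_skills : List (List (String × Int))) (upgrade_skills : List (List (String × Int))), Dom_prioritize_skills_py missing_skills upgrade_skills → Pre_prioritize_skills_py missing_skills upgrade_skills → Spec_prioritize_skills_py missing_skills upgrade_skills (prioritize_skills_py missing_skills upgrade_skills)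

-- ===== LEMMAS AND PROOFS =====

-- the strict lexicographic order Python uses on the 2-tuple keys, and its Bool comparator
def pvLexLt (c d : Int × Int) : Prop := c.1 < d.1 ∨ (c.1 = d.1 ∧ c.2 < d.2)
def pvBf (c d : Int × Int) : Bool := decide (c.1 < d.1) || (!decide (d.1 < c.1) && decide (c.2 < d.2))

theorem pvBf_iff (c d : Int × Int) : pvBf c d = true ↔ pvLexLt c d := by
  simp only [pvBf, pvLexLt, Bool.or_eq_true, Bool.and_eq_true, Bool.not_eq_true',
    decide_eq_true_iff, decide_eq_false_iff_not]
  omega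

theorem pvBf_false_iff (c d : Int × Int) : pvBf c d = false ↔ ¬ pvLexLt c d := by
  rw [← pvBf_iff]; exact Bool.eq_false_iff

theorem pvLexLt_trans {a b c : Int × Int} (h1 : pvLexLt a b) (h2 : pvLexLt b c) : pvLexLt a c := by
  unfold pvLexLt at *; omega

theorem pvLexLt_asymm {a b : Int × Int} (h : pvLexLt a b) : ¬ pvLexLt b a := by
  unfold pvLexLt at *; omega

theorem pvLexLt_total {a b : Int × Int} (hne : a ≠ b) : pvLexLt a b ∨ pvLexLt b a := by
  rcases a with ⟨a1, a2⟩; rcases b with ⟨b1, b2⟩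
  unfold pvLexLt
  by_cases h1 : a1 = b1
  · have h2 : a2 ≠ b2 := fun h => hne (by rw [h1, h])
    simp only
    omega
  · simp only
    omega

-- inserting past a prefix no element of which should come after x
theorem insertBy_append_left {α : Type} (before : α → α → Bool) (x : α) (A B : List α)
    (h : ∀ a ∈ A, before x a = false) :
    PySem.List.insertBy before x (A ++ B) = A ++ PySem.List.insertBy before x B := by
  induction A with
  | nil => rfl
  | cons a A ih =>
    simp only [List.cons_append, PySem.List.insertBy, h a (by simp)]
    exact congrArg (a :: ·) (ih (fun a ha => h a (by simp [ha])))

theorem insertBy_front {α : Type} (before : α → α → Bool) (x : α) (ys : List α)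
    (h : ∀ y ∈ ys, before x y = true) :
    PySem.List.insertBy before x ys = x :: ys := by
  cases ys with
  | nil => rfl
  | cons y ys => simp [PySem.List.insertBy, h y (by simp)]

-- insertion keeps the "no later element is lex-smaller" invariant
theorem insertBy_pairwise {α : Type} (k : α → Int × Int) (x : α) (ys : List α)
    (h : ys.Pairwise (fun a b => ¬ pvLexLt (k b) (k a))) :
    (PySem.List.insertBy (fun a b => pvBf (k a) (k b)) x ys).Pairwise
      (fun a b => ¬ pvLexLt (k b) (k a)) := by
  induction ys with
  | nil => exact List.pairwise_singleton _ _
  | cons y ys ih =>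
    rw [List.pairwise_cons] at h
    cases hb : pvBf (k x) (k y) with
    | true =>
      have hxy : pvLexLt (k x) (k y) := (pvBf_iff _ _).1 hb
      simp only [PySem.List.insertBy, hb, if_pos]
      refine List.pairwise_cons.2 ⟨?_, List.pairwise_cons.2 ⟨h.1, h.2⟩⟩
      intro z hz
      rcases List.mem_cons.1 hz with rfl | hz
      · exact fun hc => pvLexLt_asymm hxy hc
      · exact fun hc => h.1 z hz (pvLexLt_trans hc hxy)
    | false =>
      simp only [PySem.List.insertBy, hb, Bool.false_eq_true, if_false]
      refine List.pairwise_cons.2 ⟨?_, ih h.2⟩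
      intro z hz
      rcases (PySem.List.mem_insertBy _ _ _ _).1 hz with rfl | hz
      · exact (pvBf_false_iff _ _).1 hb
      · exact h.1 z hz

theorem foldl_insertBy_pairwise {α : Type} (k : α → Int × Int) (L acc : List α)
    (h : acc.Pairwise (fun a b => ¬ pvLexLt (k b) (k a))) :
    (L.foldl (fun acc x => PySem.List.insertBy (fun a b => pvBf (k a) (k b)) x acc) acc).Pairwise
      (fun a b => ¬ pvLexLt (k b) (k a)) := by
  induction L generalizing acc with
  | nil => exact h
  | cons x L ih => exact ih _ (insertBy_pairwise k x acc h)

-- inserting one record into a key-blocked list appends it to its own block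
theorem insertBy_into_blocks {α : Type} (k : α → Int × Int) (K : List (Int × Int))
    (hK : K.Pairwise pvLexLt) (g : Int × Int → List α)
    (hg : ∀ c ∈ K, ∀ r ∈ g c, k r = c) (x : α) (hx : k x ∈ K) :
    PySem.List.insertBy (fun a b => pvBf (k a) (k b)) x (K.flatMap g)
      = K.flatMap (fun c => if c = k x then g c ++ [x] else g c) := by
  induction K with
  | nil => cases hx
  | cons c K ih =>
    rw [List.pairwise_cons] at hK
    simp only [List.flatMap_cons]
    by_cases hc : k x = c
    · have hskip : ∀ a ∈ g c, pvBf (k x) (k a) = false := by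
        intro a ha
        rw [hg c (by simp) a ha, hc, pvBf_false_iff]
        unfold pvLexLt; omega
      rw [insertBy_append_left _ _ _ _ hskip,
          insertBy_front _ _ _ (by
            intro y hy
            obtain ⟨c', hc', hy'⟩ := List.mem_flatMap.1 hy
            rw [pvBf_iff, hg c' (by simp [hc']) y hy', hc]
            exact hK.1 c' hc')]
      have hlater : ∀ c' ∈ K, (if c' = k x then g c' ++ [x] else g c') = g c' := by
        intro c' hc'
        rw [if_neg]
        intro he; rw [he, hc] at hc'
        exact pvLexLt_asymm (hK.1 c hc') (hK.1 c hc')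
      rw [if_pos hc.symm, List.flatMap_congr hlater]
      simp
    · have hx' : k x ∈ K := (List.mem_cons.1 hx).resolve_left hc
      have hskip : ∀ a ∈ g c, pvBf (k x) (k a) = false := by
        intro a ha
        rw [hg c (by simp) a ha, pvBf_false_iff]
        exact pvLexLt_asymm (hK.1 _ hx')
      rw [insertBy_append_left _ _ _ _ hskip, if_neg (fun h => hc h.symm),
          ih hK.2 (fun c hc => hg c (by simp [hc])) hx']

-- the stable sort by a lex key is the concatenation of its key-buckets in key order
theorem foldl_insertBy_eq_flatMap_filter {α : Type} [DecidableEq α] (k : α → Int × Int)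
    (K : List (Int × Int)) (hK : K.Pairwise pvLexLt) (L : List α)
    (hL : ∀ r ∈ L, k r ∈ K) :
    L.foldl (fun acc x => PySem.List.insertBy (fun a b => pvBf (k a) (k b)) x acc) []
      = K.flatMap (fun c => L.filter (fun r => k r == c)) := by
  induction L using List.reverseRecOn with
  | nil => simp
  | append_singleton L x ih =>
    rw [List.foldl_append, List.foldl_cons, List.foldl_nil,
        ih (fun r hr => hL r (by simp [hr])),
        insertBy_into_blocks k K hK _
          (fun c _ r hr => by
            have := (List.mem_filter.1 hr).2; exact eq_of_beq this)
          x (hL x (by simp))]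
    apply List.flatMap_congr
    intro c hc
    rw [List.filter_append, List.filter_cons, List.filter_nil]
    by_cases h : c = k x
    · rw [if_pos h, if_pos (by simp [h])]
    · rw [if_neg h, if_neg (by simp only [beq_iff_eq]; exact fun he => h he.symm), List.append_nil]

-- the bucket-insert step IS a modify keyed by the tagged record's sort key
theorem pvAddB_eq_modify (b : PySem.Dict (Int × Int) (List (PySem.Dict String Int)))
    (s : List (String × Int)) (p sc : Int) :
    pvAddB b s p sc
      = b.modify (p, -sc) [] (· ++ [pvTagA (PySem.Dict.mk s) p sc]) := by
  rfl

-- the sort key of a tagged record is its tag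
theorem keyf_tag (d : PySem.Dict String Int) (p sc : Int) :
    ((pvTagA d p sc).getD "priority" 0, -((pvTagA d p sc).getD "priority_score" 0)) = (p, -sc) := by
  simp [pvTagA, PySem.Dict.getD_insert]

theorem prioritize_skills_py_eq (missing_skills upgrade_skills : List (List (String × Int))) :
    prioritize_skills_py missing_skills upgrade_skills = prioritize_skills_py_alt missing_skills upgrade_skills := by
  unfold prioritize_skills_py prioritize_skills_py_alt
  simp only [PySem.List.foldl_append_if, PySem.List.foldl_append_singleton_eq_map, List.nil_append]
  set keyf : PySem.Dict String Int → Int × Int :=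
    fun r => (r.getD "priority" 0, -(r.getD "priority_score" 0)) with hkeyf
  set P : List (String × Int) → Bool := fun s => (PySem.Dict.mk s).getD "required" 0 != 0 with hP
  set L : List (PySem.Dict String Int) :=
    (missing_skills.filter P).map (fun s => pvTagA (PySem.Dict.mk s) 1 ((PySem.Dict.mk s).getD "importance" 0 * 10))
    ++ upgrade_skills.map (fun s => pvTagA (PySem.Dict.mk s) 2 ((PySem.Dict.mk s).getD "gap" 1 * 5))
    ++ (missing_skills.filter (fun s => !P s)).map (fun s => pvTagA (PySem.Dict.mk s) 3 ((PySem.Dict.mk s).getD "importance" 0 * 3)) with hL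
  -- each pvAddB loop is the record-keyed modify loop over its tagged records
  have hstep : ∀ (p : Int) (sc : List (String × Int) → Int) (l : List (List (String × Int)))
      (b : PySem.Dict (Int × Int) (List (PySem.Dict String Int))),
      l.foldl (fun b s => pvAddB b s p (sc s)) b
        = (l.map (fun s => pvTagA (PySem.Dict.mk s) p (sc s))).foldl
            (fun d r => d.modify (keyf r) [] (· ++ [r])) b := by
    intro p sc l b
    rw [List.foldl_map]
    apply PySem.List.foldl_congr_mem
    intro acc s _
    rw [pvAddB_eq_modify]
    simp only [hkeyf]
    rw [keyf_tag]
  -- B's bucket dict is the modify-fold over all of L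
  have hb3 : (missing_skills.foldl (fun b s =>
        if (!((PySem.Dict.mk s).getD "required" 0 != 0))
        then pvAddB b s 3 ((PySem.Dict.mk s).getD "importance" 0 * 3) else b)
      (upgrade_skills.foldl (fun b s => pvAddB b s 2 ((PySem.Dict.mk s).getD "gap" 1 * 5))
        (missing_skills.foldl (fun b s =>
          if ((PySem.Dict.mk s).getD "required" 0 != 0)
          then pvAddB b s 1 ((PySem.Dict.mk s).getD "importance" 0 * 10) else b)
          PySem.Dict.empty)))
      = L.foldl (fun d r => d.modify (keyf r) [] (· ++ [r])) PySem.Dict.empty := by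
    rw [hL]
    simp only [List.foldl_append]
    rw [PySem.List.foldl_if_eq_foldl_filter, PySem.List.foldl_if_eq_foldl_filter,
        hstep 1 (fun s => (PySem.Dict.mk s).getD "importance" 0 * 10),
        hstep 2 (fun s => (PySem.Dict.mk s).getD "gap" 1 * 5),
        hstep 3 (fun s => (PySem.Dict.mk s).getD "importance" 0 * 3)]
  rw [hb3]
  set b3 := L.foldl (fun d r => d.modify (keyf r) [] (· ++ [r])) PySem.Dict.empty with hb3d
  -- the record fold is the pair fold, for the bucket-content and key lemmas
  have hpair : b3 = (L.map (fun r => (keyf r, r))).foldl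
      (fun d p => d.modify p.1 [] (· ++ [p.2])) PySem.Dict.empty := by
    rw [List.foldl_map]
  -- buckets read back as filters of L
  have hget : ∀ c, b3.getD c [] = L.filter (fun r => keyf r == c) := by
    intro c
    rw [hpair, PySem.Dict.getD_foldl_modify_append, PySem.Dict.getD_empty, List.nil_append,
        List.filter_map, List.map_map]
    simp only [Function.comp_def]
    exact List.map_id' _
  -- the key list of the bucket dict: the distinct keys of L in first occurrence order
  have hkeys : b3.keys = PySem.Set.ofList (L.map keyf) := by
    rw [hb3d]
    rw [PySem.Dict.keys_foldl_modify_key (l := L) (key := keyf) (d0 := [])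
      (f := fun _ r => (· ++ [r])) (d := PySem.Dict.empty)]
    simp [PySem.Set.update, PySem.Dict.keys_empty, PySem.Set.ofList_eq_foldl]
  -- the sorted key list: a strictly lex-increasing enumeration of all keys of L
  set K := PySem.List.sorted2 b3.keys (fun c => c.1) (fun c => c.2) with hK
  have hKfold : K = b3.keys.foldl
      (fun acc x => PySem.List.insertBy (fun a b => pvBf ((fun c => c) a) ((fun c => c) b)) x acc) [] := rfl
  have hKperm : K.Perm b3.keys := PySem.List.sorted2_perm _ _ _ _
  have hKpair : K.Pairwise pvLexLt := by
    have hnd : K.Nodup := hKperm.nodup_iff.2 (by rw [hkeys]; exact PySem.Set.nodup_ofList _)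
    have hp : K.Pairwise (fun a b => ¬ pvLexLt b a) := by
      rw [hKfold]
      exact foldl_insertBy_pairwise (fun c => c) _ [] (by simp)
    refine (hnd.and hp).imp ?_
    rintro a b ⟨hne, hnlt⟩
    rcases pvLexLt_total hne with h | h
    · exact h
    · exact absurd h hnlt
  have hmemK : ∀ r ∈ L, keyf r ∈ K := by
    intro r hr
    rw [hKperm.mem_iff, hkeys, PySem.Set.mem_ofList]
    exact List.mem_map_of_mem hr
  -- A's sort, as insertion over the pair comparator, equals the bucket concatenation
  have hA : PySem.List.sorted2 L (fun x => x.getD "priority" 0) (fun x => -(x.getD "priority_score" 0))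
      = K.flatMap (fun c => L.filter (fun r => keyf r == c)) := by
    have h0 : PySem.List.sorted2 L (fun x => x.getD "priority" 0) (fun x => -(x.getD "priority_score" 0))
        = L.foldl (fun acc x => PySem.List.insertBy (fun a b => pvBf (keyf a) (keyf b)) x acc) [] := rfl
    rw [h0]
    exact foldl_insertBy_eq_flatMap_filter keyf K hKpair L hmemK
  rw [hA, PySem.List.foldl_append_eq_flatMap, List.nil_append]
  congr 1
  apply List.flatMap_congr
  intro c _
  rw [hget]

-- ===== VERDICT (by name: the statement is the Claim_ definition above) =====
theorem prioritize_skills_py_spec : Claim_equal_prioritize_skills_py := by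
  intro m u _ _
  unfold Spec_prioritize_skills_py
  exact prioritize_skills_py_eq m u
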